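-- pv_equiv track=rewrite | github.com/PulfordJ/calculateremainingpensioncontributionallowance | src/calculateremainingannualpensionallowance/__init__.py | calculate_remaining_allowance
-- ===== SOURCE A (Python) =====
-- def calculate_remaining_allowance(latest_year, annual_allowances, contributions):
--     """
--     Calculates the remaining pension annual allowance in the UK.
--
--     :param annual_allowances: List of annual allowances for the last X years, ordered from oldest to newest.
--     :param contributions: List of contributions made in the last X years, ordered from oldest to newest.
--     :return: Remaining allowance after considering contributions and 3 previous tax year carry forward rules.
--     """
--     remaining_allowances = annual_allowances[:]
--
--     for year_index in range(len(contributions)):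
--         year = latest_year - len(annual_allowances) + 1 + year_index
--         contribution_to_process = contributions[year_index]
--
--         if contribution_to_process <= remaining_allowances[year_index]:
--             remaining_allowances[year_index] -= contribution_to_process
--         else:
--             # TODO if first 3 elements in contributions are above annual allowance ask user for more data from previous years.
--             contribution_to_process -= remaining_allowances[year_index]
--             remaining_allowances[year_index] = 0
--             # Attempt to use previous tax years, from oldest to newest per HMRC guidelines.
--             for i in range(max(0, year_index-3), year_index):
--                 if contribution_to_process <= remaining_allowances[i]:
--                     remaining_allowances[i] -= contribution_to_process
--                     break
--                 else:
--                     contribution_to_process -= remaining_allowances[i]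
--                     remaining_allowances[i] = 0
--
--     return remaining_allowances
-- ===== SOURCE B (Python) =====
-- def _drain(amount, window):
--     """Greedily consume `amount` from the window (oldest first), Python-level
--     break semantics: once an entry can absorb the rest, later entries are untouched."""
--     drained = []
--     for k, r in enumerate(window):
--         if amount <= r:
--             return drained + [r - amount] + window[k + 1:]
--         drained.append(0)
--         amount -= r
--     return drained
--
--
-- def calculate_remaining_allowance(latest_year, annual_allowances, contributions):
--     """Streaming sliding-window re-implementation: one pass over
--     zip(annual_allowances, contributions) maintaining only the last <=3 still-open
--     allowances; a slot is finalized (appended to the output) as soon as it leaves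
--     the 3-year carry-forward window. No index arithmetic, no full-list mutation."""
--     finalized = []
--     window = []  # remaining allowances of the <=3 most recent processed years, oldest first
--     for a, c in zip(annual_allowances, contributions):
--         if c > a:
--             window = _drain(c - a, window)
--             window.append(0)
--         else:
--             window.append(a - c)
--         if len(window) > 3:
--             finalized.append(window.pop(0))
--     return finalized + window + annual_allowances[len(contributions):]
-- ===== Notes on version B (the rewrite author's own statement) =====
-- stated objective: alternative
-- what changed: Replaces A's index arithmetic with range(max(0,j-3),j) and in-place mutation of a full copy by a single streaming pass over zip(annual_allowances, contributions) that maintains only a sliding window of the <=3 still-open previous allowances, finalizing each slot into the output as it leaves the carry-forward window.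
import Mathlib
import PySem

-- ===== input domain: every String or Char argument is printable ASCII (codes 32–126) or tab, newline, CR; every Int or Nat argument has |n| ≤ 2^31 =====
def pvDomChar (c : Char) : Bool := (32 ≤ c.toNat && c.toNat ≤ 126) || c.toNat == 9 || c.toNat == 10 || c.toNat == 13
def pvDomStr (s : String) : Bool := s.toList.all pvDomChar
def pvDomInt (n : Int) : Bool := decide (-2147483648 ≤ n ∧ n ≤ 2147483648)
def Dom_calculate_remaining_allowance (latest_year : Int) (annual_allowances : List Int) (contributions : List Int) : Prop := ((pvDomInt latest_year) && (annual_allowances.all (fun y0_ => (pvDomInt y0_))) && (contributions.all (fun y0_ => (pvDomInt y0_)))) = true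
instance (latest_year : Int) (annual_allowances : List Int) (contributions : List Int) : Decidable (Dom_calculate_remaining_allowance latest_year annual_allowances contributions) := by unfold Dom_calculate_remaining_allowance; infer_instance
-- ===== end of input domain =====

-- B replaces A's indexed in-place mutation of a full copy by a streaming pass over
-- zip(allowances, contributions) with a sliding window of the ≤3 open allowances (objective: alternative).

-- ===== PORT A =====
-- Inner 'for i in range(max(0, year_index-3), year_index)' loop with break.
-- Indices are Nat; under Pre_ every accessed index is in range, so getD/set is
-- exact Python indexing (out of range Python raises IndexError — excluded by Pre_).
def pvInnerA (rem : List Int) (c : Int) : List Nat → List Int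
  | [] => rem
  | i :: rest =>
    if c ≤ rem.getD i 0 then rem.set i (rem.getD i 0 - c)
    else pvInnerA (rem.set i 0) (c - rem.getD i 0) rest

-- body of A's 'for year_index in range(len(contributions))' loop
-- (the local 'year = latest_year - len(annual_allowances) + 1 + year_index' is unused in A and not ported)
def pvStepA (contributions : List Int) (rem : List Int) (year_index : Nat) : List Int :=
  let contribution_to_process := contributions.getD year_index 0
  if contribution_to_process ≤ rem.getD year_index 0 then
    rem.set year_index (rem.getD year_index 0 - contribution_to_process)
  else
    -- range(max(0, year_index-3), year_index) over Nat (Nat subtraction clamps at 0)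
    pvInnerA (rem.set year_index 0) (contribution_to_process - rem.getD year_index 0)
      (List.range' (year_index - 3) (year_index - (year_index - 3)))

def calculate_remaining_allowance (latest_year : Int) (annual_allowances : List Int) (contributions : List Int) : List Int :=
  (List.range contributions.length).foldl (pvStepA contributions) annual_allowances

-- ===== PORT B =====
-- B's _drain loop (break leaves the remaining window entries untouched)
def pvDrain (amount : Int) : List Int → List Int
  | [] => []
  | r :: rest => if amount ≤ r then (r - amount) :: rest else 0 :: pvDrain (amount - r) rest

-- B's main 'for a, c in zip(...)' loop, carrying (finalized, window)
def pvStream (finalized window : List Int) : List (Int × Int) → List Int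
  | [] => finalized ++ window
  | (a, c) :: rest =>
    let w := if a < c then pvDrain (c - a) window ++ [0] else window ++ [a - c]
    if 3 < w.length then pvStream (finalized ++ w.take 1) (w.drop 1) rest
    else pvStream finalized w rest

def calculate_remaining_allowance_alt (latest_year : Int) (annual_allowances : List Int) (contributions : List Int) : List Int :=
  pvStream [] [] (annual_allowances.zip contributions) ++ annual_allowances.drop contributions.length

-- ===== PRECONDITION & SPEC =====
-- Pre_ excludes exactly the inputs where Python A raises IndexError:
-- more contributions than allowances makes remaining_allowances[year_index] out of range.
def Pre_calculate_remaining_allowance (latest_year : Int) (annual_allowances : List Int) (contributions : List Int) : Prop :=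
  contributions.length ≤ annual_allowances.length
instance (latest_year : Int) (annual_allowances : List Int) (contributions : List Int) : Decidable (Pre_calculate_remaining_allowance latest_year annual_allowances contributions) := by unfold Pre_calculate_remaining_allowance; infer_instance

def pvWitness_calculate_remaining_allowance : Int × List Int × List Int := (2024, [40, 40, 40], [10, 60])

def Spec_calculate_remaining_allowance (latest_year : Int) (annual_allowances : List Int) (contributions : List Int) (out : List Int) : Prop := out = calculate_remaining_allowance_alt latest_year annual_allowances contributions
instance (latest_year : Int) (annual_allowances : List Int) (contributions : List Int) (out : List Int) : Decidable (Spec_calculate_remaining_allowance latest_year annual_allowances contributions out) := by unfold Spec_calculate_remaining_allowance; infer_instance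

-- ===== CLAIM (what is proved, stated in full; the proofs are below) =====
def Claim_equal_calculate_remaining_allowance : Prop := ∀ (latest_year : Int) (annual_allowances : List Int) (contributions : List Int), Dom_calculate_remaining_allowance latest_year annual_allowances contributions → Pre_calculate_remaining_allowance latest_year annual_allowances contributions → Spec_calculate_remaining_allowance latest_year annual_allowances contributions (calculate_remaining_allowance latest_year annual_allowances contributions)

-- ===== LEMMAS AND PROOFS =====

theorem pv_getD_append_len (l1 l2 : List Int) (i : Nat) (d : Int) :
    (l1 ++ l2).getD (l1.length + i) d = l2.getD i d := by
  induction l1 with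
  | nil => simp
  | cons x xs ih => simpa [List.length_cons, Nat.succ_add] using ih

theorem pv_set_append_len (l1 l2 : List Int) (i : Nat) (v : Int) :
    (l1 ++ l2).set (l1.length + i) v = l1 ++ l2.set i v := by
  induction l1 with
  | nil => simp
  | cons x xs ih => simpa [List.length_cons, Nat.succ_add] using ih

theorem pvDrain_length (amount : Int) (w : List Int) :
    (pvDrain amount w).length = w.length := by
  induction w generalizing amount with
  | nil => rfl
  | cons r rest ih => simp only [pvDrain]; split <;> simp [ih]

-- A's inner carry-forward loop, run on the window region of fin ++ window ++ tail,
-- is B's _drain on the window.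
theorem pvInnerA_window (window : List Int) : ∀ (fin tail : List Int) (amt : Int),
    pvInnerA (fin ++ (window ++ tail)) amt (List.range' fin.length window.length)
      = fin ++ (pvDrain amt window ++ tail) := by
  induction window with
  | nil => intro fin tail amt; simp [pvInnerA, pvDrain]
  | cons r ws ih =>
    intro fin tail amt
    have hget : (fin ++ (r :: (ws ++ tail))).getD fin.length 0 = r := by
      simpa using pv_getD_append_len fin (r :: (ws ++ tail)) 0 0
    have hset : ∀ v : Int, (fin ++ (r :: (ws ++ tail))).set fin.length v
        = fin ++ (v :: (ws ++ tail)) := by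
      intro v; simpa using pv_set_append_len fin (r :: (ws ++ tail)) 0 v
    simp only [List.length_cons, List.range'_succ, pvInnerA, List.cons_append, hget, hset]
    by_cases h : amt ≤ r
    · simp [pvDrain, h]
    · rw [if_neg h]
      have := ih (fin ++ [0]) tail (amt - r)
      simp only [List.length_append, List.length_cons, List.length_nil,
        List.append_assoc, List.cons_append, List.nil_append] at this
      simpa [pvDrain, h] using this

-- One step of A (at index j = fin.length + window.length, with the head of the
-- remaining allowances as the own-year slot) equals one stream step of B.
theorem pvStepA_window (cs fin window rest' : List Int) (a : Int)
    (hw : window.length = min (fin.length + window.length) 3) :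
    pvStepA cs (fin ++ (window ++ (a :: rest'))) (fin.length + window.length)
      = fin ++ ((if a < cs.getD (fin.length + window.length) 0
                 then pvDrain (cs.getD (fin.length + window.length) 0 - a) window ++ [0]
                 else window ++ [a - cs.getD (fin.length + window.length) 0]) ++ rest') := by
  set j := fin.length + window.length with hj
  set c := cs.getD j 0 with hc
  have hget : (fin ++ (window ++ (a :: rest'))).getD j 0 = a := by
    have h1 : (window ++ (a :: rest')).getD (window.length + 0) 0 = a := by
      simpa using pv_getD_append_len window (a :: rest') 0 0
    calc (fin ++ (window ++ (a :: rest'))).getD (fin.length + window.length) 0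
        = (window ++ (a :: rest')).getD window.length 0 :=
          pv_getD_append_len fin (window ++ (a :: rest')) window.length 0
      _ = a := by simpa using h1
  have hset : ∀ v : Int, (fin ++ (window ++ (a :: rest'))).set j v
      = fin ++ (window ++ (v :: rest')) := by
    intro v
    have h1 : (window ++ (a :: rest')).set (window.length + 0) v = window ++ (v :: rest') := by
      simpa using pv_set_append_len window (a :: rest') 0 v
    calc (fin ++ (window ++ (a :: rest'))).set (fin.length + window.length) v
        = fin ++ (window ++ (a :: rest')).set window.length v :=
          pv_set_append_len fin (window ++ (a :: rest')) window.length v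
      _ = fin ++ (window ++ (v :: rest')) := by simpa using h1
  have hrange : List.range' (j - 3) (j - (j - 3)) = List.range' fin.length window.length := by
    have h2 : j - (j - 3) = window.length := by omega
    have h1 : j - 3 = fin.length := by omega
    rw [h2, h1]
  unfold pvStepA
  simp only [← hc, hget]
  by_cases h : c ≤ a
  · rw [if_pos h, if_neg (by omega : ¬ a < c), hset]
    simp
  · rw [if_neg h, if_pos (by omega : a < c), hset, hrange]
    have := pvInnerA_window window fin (0 :: rest') (c - a)
    simpa [List.append_assoc] using this

-- Main invariant: A's fold from index j on state fin ++ window ++ rest equals B's stream.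
theorem pv_stream_main (cs : List Int) : ∀ (k j : Nat) (fin window rest : List Int),
    j + k = cs.length →
    k ≤ rest.length →
    window.length = min j 3 →
    fin.length + window.length = j →
    (List.range' j k).foldl (pvStepA cs) (fin ++ (window ++ rest))
      = pvStream fin window (rest.zip (cs.drop j)) ++ rest.drop k := by
  intro k
  induction k with
  | zero =>
    intro j fin window rest hjk _ _ _
    have : cs.drop j = [] := by
      apply List.drop_eq_nil_of_le; omega
    simp [this, pvStream, List.append_assoc]
  | succ k ih =>
    intro j fin window rest hjk hk hw hfw
    obtain ⟨a, rest', rfl⟩ : ∃ a rest', rest = a :: rest' := by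
      cases rest with
      | nil => simp at hk
      | cons a r => exact ⟨a, r, rfl⟩
    have hj : j < cs.length := by omega
    have hdrop : cs.drop j = cs.getD j 0 :: cs.drop (j + 1) := by
      rw [List.getD_eq_getElem?_getD, List.getElem?_eq_getElem hj]
      simpa using (List.drop_eq_getElem_cons hj).symm
    set c := cs.getD j 0 with hc
    rw [List.range'_succ, List.foldl_cons]
    rw [show j = fin.length + window.length from hfw.symm]
    rw [pvStepA_window cs fin window rest' a (by omega)]
    set w := (if a < c then pvDrain (c - a) window ++ [0] else window ++ [a - c]) with hwdef
    have hwl : w.length = window.length + 1 := by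
      rw [hwdef]; split <;> simp [pvDrain_length]
    rw [hfw, hdrop]
    simp only [List.zip_cons_cons, pvStream, ← hc, ← hwdef]
    by_cases h4 : 3 < w.length
    · rw [if_pos h4]
      have : fin ++ (w ++ rest') = (fin ++ w.take 1) ++ (w.drop 1 ++ rest') := by
        conv_lhs => rw [← List.take_append_drop 1 w]
        simp [List.append_assoc]
      rw [this, ih (j + 1) (fin ++ w.take 1) (w.drop 1) rest' (by omega) (by simpa using hk)
        (by simp [hwl]; omega) (by simp [hwl]; omega)]
      simp
    · rw [if_neg h4]
      rw [ih (j + 1) fin w rest' (by omega) (by simpa using hk)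
        (by omega) (by omega)]
      simp

-- ===== VERDICT (by name: the statement is the Claim_ definition above) =====
theorem calculate_remaining_allowance_spec : Claim_equal_calculate_remaining_allowance := by
  intro latest_year aa cs _ hpre
  unfold Spec_calculate_remaining_allowance
  unfold calculate_remaining_allowance calculate_remaining_allowance_alt
  rw [List.range_eq_range']
  have := pv_stream_main cs cs.length 0 [] [] aa (by omega) hpre (by simp) (by simp)
  simpa using this
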